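-- pv_equiv track=rewrite | github.com/dickie81/r-infinite | tools/research/cascade_bott_oscillation.py | rho
-- ===== SOURCE A (Python) =====
-- def rho(n):
--     """Radon-Hurwitz number rho(n) via Hurwitz formula.
--
--     Write n = 2^a * m with m odd; a = 4q + r with 0 <= r <= 3;
--     rho(n) = 8q + 2^r.
--     """
--     if n <= 0:
--         return 0
--     a = 0
--     m = n
--     while m % 2 == 0:
--         m //= 2
--         a += 1
--     q, r = divmod(a, 4)
--     return 8 * q + (2 ** r)
-- ===== SOURCE B (Python) =====
-- def rho(n):
--     """Radon-Hurwitz number rho(n) via Hurwitz formula.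
--
--     n = 2^a * m with m odd; a = 4q + r, 0 <= r <= 3; rho(n) = 8q + 2^r.
--     The trailing-zero count a is read off the lowest set bit in one
--     arithmetic step instead of a division loop.
--     """
--     if n <= 0:
--         return 0
--     a = (n & -n).bit_length() - 1
--     q, r = divmod(a, 4)
--     return 8 * q + 2 ** r
-- ===== Notes on version B (the rewrite author's own statement) =====
-- stated objective: idiomatic
-- what changed: The while-loop that repeatedly halves n to count its trailing zeros is replaced by the closed-form bit trick (n & -n).bit_length() - 1, which isolates the lowest set bit and reads its position directly; no loop or accumulator remains.
import Mathlib
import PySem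

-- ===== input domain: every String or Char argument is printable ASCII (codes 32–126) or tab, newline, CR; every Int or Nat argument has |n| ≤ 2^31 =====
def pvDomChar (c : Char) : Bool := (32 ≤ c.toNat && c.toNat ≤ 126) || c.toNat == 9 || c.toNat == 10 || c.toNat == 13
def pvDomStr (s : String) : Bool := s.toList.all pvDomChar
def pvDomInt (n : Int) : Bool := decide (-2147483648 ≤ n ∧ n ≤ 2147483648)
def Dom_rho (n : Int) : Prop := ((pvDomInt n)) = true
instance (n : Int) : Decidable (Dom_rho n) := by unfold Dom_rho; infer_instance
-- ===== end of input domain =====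

-- B replaces A's trailing-zero-counting division loop with the closed-form
-- bit expression (n & -n).bit_length() - 1 (idiomatic; no loop, no accumulator).


-- ===== PORT A =====
-- the `while m % 2 == 0: m //= 2; a += 1` loop (Python loops only reach m ≠ 0,
-- since n > 0; the `m ≠ 0` conjunct is a totality guard for that fact)
def rhoLoop (m a : Int) : Int :=
  if h : PySem.Int.mod m 2 = 0 ∧ m ≠ 0 then
    rhoLoop (PySem.Int.floordiv m 2) (a + 1)
  else a
termination_by m.natAbs
decreasing_by
  obtain ⟨h2, h0⟩ := h
  rw [PySem.Int.mod_eq_zero_iff_dvd] at h2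
  obtain ⟨c, hc⟩ := h2
  rw [PySem.Int.floordiv_eq_ediv_of_pos (by omega), hc, Int.mul_ediv_cancel_left _ (by omega)]
  subst hc; omega

def rho (n : Int) : Int :=
  if n ≤ 0 then 0
  else
    let a := rhoLoop n 0
    let q := PySem.Int.floordiv a 4
    let r := PySem.Int.mod a 4
    8 * q + 2 ^ r.toNat

-- ===== PORT B =====
def rho_alt (n : Int) : Int :=
  if n ≤ 0 then 0
  else
    let a : Int := (PySem.Int.bitLength (PySem.Int.band n (-n)) : Int) - 1
    let q := PySem.Int.floordiv a 4
    let r := PySem.Int.mod a 4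
    8 * q + 2 ^ r.toNat

-- ===== PRECONDITION & SPEC =====
def Spec_rho (n : Int) (out : Int) : Prop := out = rho_alt n
instance (n : Int) (out : Int) : Decidable (Spec_rho n out) := by unfold Spec_rho; infer_instance

-- ===== CLAIM (what is proved, stated in full; the proofs are below) =====
def Claim_equal_rho : Prop := ∀ (n : Int), Dom_rho n → Spec_rho n (rho n)

-- ===== LEMMAS AND PROOFS =====

-- m - (m &&& (m-1)) is the lowest set bit of m
def lowbit (m : Nat) : Nat := m - (m &&& (m - 1))

lemma lowbit_odd (m : Nat) (h : m % 2 = 1) : lowbit m = 1 := by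
  have hd : (m &&& (m - 1)) / 2 = m / 2 := by
    rw [Nat.and_div_two]
    have : (m - 1) / 2 = m / 2 := by omega
    rw [this, Nat.and_self]
  have hm : (m &&& (m - 1)) % 2 = 0 := by
    have := Nat.and_mod_two_eq_one (a := m) (b := m - 1)
    omega
  have hle : m &&& (m - 1) ≤ m - 1 := Nat.and_le_right
  unfold lowbit; omega

lemma lowbit_even (k : Nat) (hk : 0 < k) : lowbit (2 * k) = 2 * lowbit k := by
  have hd : ((2 * k) &&& (2 * k - 1)) / 2 = k &&& (k - 1) := by
    rw [Nat.and_div_two]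
    have h1 : 2 * k / 2 = k := by omega
    have h2 : (2 * k - 1) / 2 = k - 1 := by omega
    rw [h1, h2]
  have hm : ((2 * k) &&& (2 * k - 1)) % 2 = 0 := by
    have := Nat.and_mod_two_eq_one (a := 2 * k) (b := 2 * k - 1)
    omega
  have hle1 : k &&& (k - 1) ≤ k - 1 := Nat.and_le_right
  have hle2 : (2 * k) &&& (2 * k - 1) ≤ 2 * k - 1 := Nat.and_le_right
  unfold lowbit; omega

lemma lowbit_pos (m : Nat) (h : 0 < m) : 0 < lowbit m := by
  have : m &&& (m - 1) ≤ m - 1 := Nat.and_le_right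
  unfold lowbit; omega

-- for n > 0, Python's n & -n is the lowest set bit of n
lemma band_neg_self (n : Int) (h : 0 < n) :
    PySem.Int.band n (-n) = ((lowbit n.toNat : Nat) : Int) := by
  have h1 : ¬ (0 ≤ -n) := by omega
  have h2 : (-(-n) - 1).toNat = n.toNat - 1 := by omega
  simp only [PySem.Int.band, if_pos (by omega : (0:Int) ≤ n), if_neg h1, h2]
  rfl

-- the loop counts exactly bit_length(lowbit) - 1 steps
lemma rhoLoop_eq (m : Nat) (hm : 0 < m) :
    ∀ a : Int, rhoLoop (m : Int) a
      = a + ((PySem.Int.bitLength ((lowbit m : Nat) : Int) : Int) - 1) := by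
  induction m using Nat.strong_induction_on with
  | _ m ih =>
    intro a
    rcases Nat.even_or_odd m with ⟨k, hk⟩ | hodd
    · -- even: one loop step, then induction on k
      have hk0 : 0 < k := by omega
      have hmod : PySem.Int.mod (m : Int) 2 = 0 := by
        rw [PySem.Int.mod_eq_zero_iff_dvd]; exact ⟨(k : Int), by omega⟩
      rw [rhoLoop, dif_pos ⟨hmod, by omega⟩]
      have hdiv : PySem.Int.floordiv (m : Int) 2 = (k : Nat) := by
        rw [PySem.Int.floordiv_eq_ediv_of_pos (by omega)]
        omega
      rw [hdiv, ih k (by omega) hk0 (a + 1)]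
      have hlow : lowbit m = 2 * lowbit k := by
        rw [hk, show k + k = 2 * k from by omega, lowbit_even k hk0]
      have hlp : 0 < lowbit k := lowbit_pos k hk0
      have hbl : PySem.Int.bitLength ((lowbit m : Nat) : Int)
          = PySem.Int.bitLength ((lowbit k : Nat) : Int) + 1 := by
        rw [hlow, PySem.Int.bitLength_natCast (m := 2 * lowbit k) (by omega)]
        congr 2
        omega
      rw [hbl]; push_cast; ring
    · -- odd: loop does not run; lowbit m = 1
      have hmod : ¬ PySem.Int.mod (m : Int) 2 = 0 := by
        rw [PySem.Int.mod_eq_zero_iff_dvd]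
        intro ⟨c, hc⟩
        have h1 : m % 2 = 1 := Nat.odd_iff.mp hodd
        omega
      rw [rhoLoop, dif_neg (by tauto)]
      rw [lowbit_odd m (Nat.odd_iff.mp hodd)]
      norm_num
      rfl

theorem rho_spec_aux (n : Int) : rho n = rho_alt n := by
  unfold rho rho_alt
  by_cases hn : n ≤ 0
  · simp [hn]
  · have h0 : 0 < n := by omega
    have hcast : ((n.toNat : Nat) : Int) = n := by omega
    have := rhoLoop_eq n.toNat (by omega) 0
    rw [hcast] at this
    simp only [if_neg hn]
    rw [this, band_neg_self n h0]
    norm_num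

-- ===== VERDICT (by name: the statement is the Claim_ definition above) =====
theorem rho_spec : Claim_equal_rho := by
  intro n _
  unfold Spec_rho
  exact rho_spec_aux n
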